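-- pv_equiv track=rewrite | github.com/cycle13/examplesdel | 074 python算个税/incometax.py | calulate_income_rank
-- ===== SOURCE A (Python) =====
-- money = [0, 3000, 12000, 25000, 35000, 55000, 80000, 99999999]#income range
--
-- def calulate_income_rank(num):
-- 	for id in range(1,len(money)):
-- 		if num > money[id-1] and num <= money[id]:
-- 			break
-- 		elif num <= 0 :
-- 			id = 0
-- 			break
-- 	return id
-- ===== SOURCE B (Python) =====
-- import bisect
--
-- money = [0, 3000, 12000, 25000, 35000, 55000, 80000, 99999999]  # income range
--
--
-- def calulate_income_rank(num):
--     # binary search for the bracket instead of a linear scan;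
--     # the cap returns the last bracket id for incomes above the top bound
--     return min(bisect.bisect_left(money, num), len(money) - 1)
-- ===== Notes on version B (the rewrite author's own statement) =====
-- stated objective: idiomatic
-- what changed: Replaces the linear interval scan with a bisect_left binary search over the same sorted thresholds, capped at the last index.
import Mathlib
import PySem

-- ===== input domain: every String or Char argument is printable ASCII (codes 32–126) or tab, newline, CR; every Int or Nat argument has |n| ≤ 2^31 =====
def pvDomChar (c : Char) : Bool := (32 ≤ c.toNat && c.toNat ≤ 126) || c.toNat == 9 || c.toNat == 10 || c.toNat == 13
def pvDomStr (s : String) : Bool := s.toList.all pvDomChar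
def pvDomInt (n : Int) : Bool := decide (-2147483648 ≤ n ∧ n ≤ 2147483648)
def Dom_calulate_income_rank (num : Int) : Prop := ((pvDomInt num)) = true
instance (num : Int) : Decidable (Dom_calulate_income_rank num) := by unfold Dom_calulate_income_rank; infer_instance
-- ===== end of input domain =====

-- B replaces A's linear interval scan with a bisect_left binary search over the
-- same sorted thresholds (capped at the last index) — more idiomatic, same values.

-- ===== PORT A =====
-- module-level constant `money`
def pvMoney : List Int := [0, 3000, 12000, 25000, 35000, 55000, 80000, 99999999]

-- the for-loop over range(1, len(money)) with its two breaks; after a full pass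
-- the loop variable keeps its last value (`last`).  Indexing is by concrete
-- in-range indices, ported with getD (exact here: every index is in range).
def pvScanA (num : Int) : List Int → Int → Int
  | [], last => last
  | i :: rest, _ =>
      -- indices here are 1..7, so `.toNat` is exact (no negative index occurs)
      if num > pvMoney.getD (i - 1).toNat 0 ∧ num ≤ pvMoney.getD i.toNat 0 then i
      else if num ≤ 0 then 0
      else pvScanA num rest i

def calulate_income_rank (num : Int) : Int :=
  pvScanA num (PySem.List.pyRange 1 (pvMoney.length : Int) 1) 0

-- ===== PORT B =====
-- bisect.bisect_left ported as the standard lo/hi binary search (fuel = length,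
-- enough since hi - lo halves each step)
def pvBisectLeft (a : List Int) (x : Int) (lo hi fuel : Nat) : Nat :=
  match fuel with
  | 0 => lo
  | fuel + 1 =>
      if lo < hi then
        let mid := (lo + hi) / 2
        if a.getD mid 0 < x then pvBisectLeft a x (mid + 1) hi fuel
        else pvBisectLeft a x lo mid fuel
      else lo

def calulate_income_rank_alt (num : Int) : Int :=
  min ((pvBisectLeft pvMoney num 0 pvMoney.length pvMoney.length : Nat) : Int)
      ((pvMoney.length : Int) - 1)

-- ===== PRECONDITION & SPEC =====
def Spec_calulate_income_rank (num : Int) (out : Int) : Prop := out = calulate_income_rank_alt num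
instance (num : Int) (out : Int) : Decidable (Spec_calulate_income_rank num out) := by unfold Spec_calulate_income_rank; infer_instance

-- ===== CLAIM (what is proved, stated in full; the proofs are below) =====
def Claim_equal_calulate_income_rank : Prop := ∀ (num : Int), Dom_calulate_income_rank num → Spec_calulate_income_rank num (calulate_income_rank num)

-- ===== LEMMAS AND PROOFS =====

-- ===== VERDICT (by name: the statement is the Claim_ definition above) =====
theorem calulate_income_rank_spec : Claim_equal_calulate_income_rank := by
  intro num _
  unfold Spec_calulate_income_rank calulate_income_rank calulate_income_rank_alt
  rw [show PySem.List.pyRange 1 ((pvMoney.length : Int)) 1 = [1, 2, 3, 4, 5, 6, 7]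
    from by decide]
  norm_num [pvScanA, pvBisectLeft, pvMoney, List.getD,
    show ((0:Int)).toNat = 0 from rfl, show ((1:Int)).toNat = 1 from rfl, show ((2:Int)).toNat = 2 from rfl, show ((3:Int)).toNat = 3 from rfl, show ((4:Int)).toNat = 4 from rfl, show ((5:Int)).toNat = 5 from rfl, show ((6:Int)).toNat = 6 from rfl, show ((7:Int)).toNat = 7 from rfl]
  split_ifs <;> omega
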